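-- pv_equiv track=rewrite | github.com/msjithin/Python_exercises | Anagram_diff.py | anagram_difference
-- ===== SOURCE A (Python) =====
-- from collections import Counter
--
-- def anagram_difference(s):
--     n = len(s)//2
--
--     arr1 = s[:n]
--     arr2 = s[n:]
--
--     if len(s) % 2 == 1:
--         return -1
--
--     res = 0
--     counter = Counter(arr1)
--
--     for c in arr2:
--         if c in counter and counter[c] > 0:
--             counter[c] -= 1
--         else:
--             res += 1
--
--     return res
-- ===== SOURCE B (Python) =====
-- def anagram_difference(s):
--     if len(s) % 2 == 1:
--         return -1
--     n = len(s) // 2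
--     a = sorted(s[:n])
--     b = sorted(s[n:])
--     res = i = j = 0
--     while j < len(b):
--         if i < len(a):
--             if a[i] == b[j]:
--                 i += 1
--                 j += 1
--             elif a[i] < b[j]:
--                 i += 1
--             else:
--                 res += 1
--                 j += 1
--         else:
--             res += 1
--             j += 1
--     return res
-- ===== Notes on version B (the rewrite author's own statement) =====
-- stated objective: alternative
-- what changed: Replaces A's hash-table frequency counting (Counter build plus a decrementing membership loop) by sorting both halves and running a two-pointer merge that counts second-half characters with no partner in the first half.
import Mathlib
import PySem

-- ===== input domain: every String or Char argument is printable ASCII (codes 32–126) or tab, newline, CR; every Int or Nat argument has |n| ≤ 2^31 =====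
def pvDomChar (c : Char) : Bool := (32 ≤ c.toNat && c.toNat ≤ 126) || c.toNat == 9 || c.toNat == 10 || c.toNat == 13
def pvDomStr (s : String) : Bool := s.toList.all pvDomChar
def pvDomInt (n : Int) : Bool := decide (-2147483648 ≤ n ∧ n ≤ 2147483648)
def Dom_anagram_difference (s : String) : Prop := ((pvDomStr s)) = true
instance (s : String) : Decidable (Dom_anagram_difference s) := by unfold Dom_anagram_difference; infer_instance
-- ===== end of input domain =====

-- B replaces A's hash-table counting (Counter build + decrementing membership loop) by
-- sorting both halves and a two-pointer merge counting unmatched second-half characters;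
-- same value everywhere, objective: alternative algorithm.

-- ===== PORT A =====
def anagram_difference (s : String) : Int :=
  let n := PySem.Int.floordiv (PySem.Str.len s) 2
  let arr1 := PySem.List.slice s.toList none (some n)
  let arr2 := PySem.List.slice s.toList (some n) none
  if PySem.Int.mod (PySem.Str.len s) 2 = 1 then -1
  else
    (arr2.foldl
      (fun (st : PySem.Dict Char Int × Int) c =>
        if st.1.contains c ∧ st.1.getD c 0 > 0 then
          (st.1.insert c (st.1.getD c 0 - 1), st.2)
        else
          (st.1, st.2 + 1))
      (PySem.Dict.counter arr1, 0)).2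

-- ===== PORT B =====
-- B's while loop over indices i, j, res: the already-consumed prefixes disappear, so the
-- loop is the evident recursion on the two remaining suffixes with the accumulator res.
def pvMergeLoop : List Char → List Char → Int → Int
  | _, [], res => res                                   -- j = len(b): loop exits
  | [], _ :: b', res => pvMergeLoop [] b' (res + 1)     -- i = len(a): res += 1; j += 1
  | x :: a', y :: b', res =>
      if x = y then pvMergeLoop a' b' res               -- a[i] == b[j]
      else if x < y then pvMergeLoop a' (y :: b') res   -- a[i] < b[j]
      else pvMergeLoop (x :: a') b' (res + 1)           -- a[i] > b[j]
  termination_by a b _ => a.length + b.length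

def anagram_difference_alt (s : String) : Int :=
  if PySem.Int.mod (PySem.Str.len s) 2 = 1 then -1
  else
    let n := PySem.Int.floordiv (PySem.Str.len s) 2
    let a := PySem.List.sorted (PySem.List.slice s.toList none (some n)) (fun x => x) false
    let b := PySem.List.sorted (PySem.List.slice s.toList (some n) none) (fun x => x) false
    pvMergeLoop a b 0

-- ===== PRECONDITION & SPEC =====
def Spec_anagram_difference (s : String) (out : Int) : Prop := out = anagram_difference_alt s
instance (s : String) (out : Int) : Decidable (Spec_anagram_difference s out) := by unfold Spec_anagram_difference; infer_instance

-- ===== CLAIM (what is proved, stated in full; the proofs are below) =====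
def Claim_equal_anagram_difference : Prop := ∀ (s : String), Dom_anagram_difference s → Spec_anagram_difference s (anagram_difference s)

-- ===== LEMMAS AND PROOFS =====

-- both sides are shown equal to this sum of positive surpluses
def pvSurplus (a b : List Char) : Int :=
  ∑ x ∈ b.toFinset, max ((b.count x : Int) - (a.count x : Int)) 0

-- ---- A side: abstract version of A's loop (g holds the remaining counts) ----
def pvExcess : List Char → (Char → Int) → Int
  | [], _ => 0
  | c :: rest, g =>
      if g c > 0 then pvExcess rest (fun x => if x = c then g c - 1 else g x)
      else 1 + pvExcess rest g

lemma loopA_eq (p : List Char) : ∀ (d : PySem.Dict Char Int) (res : Int),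
    (p.foldl
      (fun (st : PySem.Dict Char Int × Int) c =>
        if st.1.contains c ∧ st.1.getD c 0 > 0 then
          (st.1.insert c (st.1.getD c 0 - 1), st.2)
        else
          (st.1, st.2 + 1))
      (d, res)).2 = res + pvExcess p (fun c => d.getD c 0) := by
  induction p with
  | nil => intro d res; simp [pvExcess]
  | cons c rest ih =>
    intro d res
    by_cases h : d.getD c 0 > 0
    · have hcont : d.contains c = true := by
        by_contra hc
        rw [PySem.Dict.getD_of_not_contains d 0 (by simpa using hc)] at h
        omega
      simp only [List.foldl_cons, pvExcess, hcont, true_and, gt_iff_lt, if_pos h]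
      rw [ih]
      congr 1
      congr 1
      funext x
      by_cases hx : x = c
      · subst hx; rw [PySem.Dict.getD_insert_self]; simp
      · rw [PySem.Dict.getD_insert_of_ne _ _ _ hx, if_neg hx]
    · have : ¬ (d.contains c = true ∧ d.getD c 0 > 0) := by tauto
      simp only [List.foldl_cons, pvExcess, if_neg this, if_neg h]
      rw [ih]
      ring

-- pvExcess equals the sum of positive surpluses (counts minus available supply)
lemma pvExcess_eq_sum (p : List Char) : ∀ (g : Char → Int), (∀ c, 0 ≤ g c) →
    pvExcess p g = ∑ x ∈ p.toFinset, max ((p.count x : Int) - g x) 0 := by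
  induction p with
  | nil => intro g _; simp [pvExcess]
  | cons c rest ih =>
    intro g hg
    by_cases h : g c > 0
    · have hg' : ∀ x, 0 ≤ (fun x => if x = c then g c - 1 else g x) x := by
        intro x; by_cases hx : x = c <;> simp [hx] <;> [omega; exact hg x]
      rw [pvExcess, if_pos h, ih _ hg']
      have hterm : ∀ x ∈ rest.toFinset,
          max ((rest.count x : Int) - (if x = c then g c - 1 else g x)) 0
            = max (((c :: rest).count x : Int) - g x) 0 := by
        intro x _
        by_cases hx : x = c
        · subst hx
          simp only [List.count_cons_self]
          push_cast; omega
        · simp [hx, Ne.symm hx]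
      rw [Finset.sum_congr rfl hterm]
      rw [List.toFinset_cons]
      by_cases hc : c ∈ rest.toFinset
      · rw [Finset.insert_eq_self.mpr hc]
      · rw [Finset.sum_insert hc]
        have : max (((c :: rest).count c : Int) - g c) 0 = 0 := by
          have hcr : c ∉ rest := by simpa using hc
          simp only [List.count_cons_self, List.count_eq_zero.mpr hcr]
          push_cast; omega
        rw [this, zero_add]
    · have hg0 : g c = 0 := le_antisymm (by omega) (hg c)
      rw [pvExcess, if_neg h, ih _ hg]
      rw [List.toFinset_cons]
      by_cases hc : c ∈ rest.toFinset
      · rw [Finset.insert_eq_self.mpr hc]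
        rw [← Finset.sum_erase_add _ _ hc, ← Finset.sum_erase_add _ _ hc]
        have h1 : max (((c :: rest).count c : Int) - g c) 0
            = max ((rest.count c : Int) - g c) 0 + 1 := by
          simp only [List.count_cons_self, hg0]
          push_cast; omega
        have h2 : ∀ x ∈ rest.toFinset.erase c,
            max (((c :: rest).count x : Int) - g x) 0
              = max ((rest.count x : Int) - g x) 0 := by
          intro x hx
          have hxc : x ≠ c := (Finset.mem_erase.mp hx).1
          simp [hxc.symm]
        rw [Finset.sum_congr rfl h2, h1]
        ring
      · rw [Finset.sum_insert hc]
        have hcr : c ∉ rest := by simpa using hc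
        have h1 : max (((c :: rest).count c : Int) - g c) 0 = 1 := by
          simp only [List.count_cons_self, List.count_eq_zero.mpr hcr, hg0]
          push_cast; omega
        have h2 : ∀ x ∈ rest.toFinset,
            max (((c :: rest).count x : Int) - g x) 0
              = max ((rest.count x : Int) - g x) 0 := by
          intro x hx
          have hxc : x ≠ c := by rintro rfl; exact hc hx
          simp [hxc.symm]
        rw [Finset.sum_congr rfl h2, h1]

-- ---- B side: the merge over two sorted lists computes the same sum ----
lemma pvMergeLoop_eq_sum : ∀ (a b : List Char) (res : Int),
    a.Pairwise (· ≤ ·) → b.Pairwise (· ≤ ·) →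
    pvMergeLoop a b res = res + pvSurplus a b := by
  intro a b res ha hb
  induction a, b, res using pvMergeLoop.induct with
  | case1 a res => simp [pvMergeLoop, pvSurplus]
  | case2 y b' res ih =>
    rw [pvMergeLoop, ih (by simp) (hb.sublist (List.sublist_cons_self y b'))]
    have hz : ∀ (l : List Char),
        ∑ x ∈ l.toFinset, max ((l.count x : Int)) 0 = (l.length : Int) := by
      intro l
      have h1 : ∀ x ∈ l.toFinset, max ((l.count x : Int)) 0 = ((l.count x : Nat) : Int) :=
        fun x _ => max_eq_left (by positivity)
      rw [Finset.sum_congr rfl h1, ← Nat.cast_sum]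
      congr 1
      simp
    have : pvSurplus [] (y :: b') = pvSurplus [] b' + 1 := by
      unfold pvSurplus
      simp only [List.count_nil, Nat.cast_zero, sub_zero]
      rw [hz, hz]
      push_cast [List.length_cons]
      ring
    rw [this]; ring
  | case3 a' y b' res ih =>
    rw [pvMergeLoop, if_pos rfl,
        ih (ha.sublist (List.sublist_cons_self y a')) (hb.sublist (List.sublist_cons_self y b'))]
    have : pvSurplus a' b' = pvSurplus (y :: a') (y :: b') := by
      unfold pvSurplus
      have hterm : ∀ c,
          max (((y :: b').count c : Int) - ((y :: a').count c : Int)) 0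
            = max ((b'.count c : Int) - (a'.count c : Int)) 0 := by
        intro c
        by_cases hc : c = y
        · subst hc; simp only [List.count_cons_self]; push_cast; omega
        · simp [Ne.symm hc]
      rw [List.toFinset_cons]
      by_cases hx : y ∈ b'.toFinset
      · rw [Finset.insert_eq_self.mpr hx]
        exact (Finset.sum_congr rfl (fun c _ => hterm c)).symm
      · rw [Finset.sum_insert hx, hterm y]
        have hxb : y ∉ b' := by simpa using hx
        have : max ((b'.count y : Int) - (a'.count y : Int)) 0 = 0 := by
          rw [List.count_eq_zero.mpr hxb]
          have : (0:Int) ≤ (a'.count y : Int) := by positivity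
          push_cast; omega
        rw [this, zero_add]
        exact (Finset.sum_congr rfl (fun c _ => hterm c)).symm
    rw [this]
  | case4 x a' y b' res hne hlt ih =>
    rw [pvMergeLoop, if_neg hne, if_pos hlt,
        ih (ha.sublist (List.sublist_cons_self x a')) hb]
    have : pvSurplus a' (y :: b') = pvSurplus (x :: a') (y :: b') := by
      unfold pvSurplus
      apply Finset.sum_congr rfl
      intro c hc
      have hyc : y ≤ c := by
        rcases List.mem_cons.mp (List.mem_toFinset.mp hc) with h | h
        · exact h.ge
        · exact (List.pairwise_cons.mp hb).1 c h
      have hxc : c ≠ x := fun h => absurd (h ▸ hyc) (not_le.mpr hlt)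
      simp [List.count_cons, Ne.symm hxc]
    rw [this]
  | case5 x a' y b' res hne hnlt ih =>
    rw [pvMergeLoop, if_neg hne, if_neg hnlt,
        ih ha (hb.sublist (List.sublist_cons_self y b'))]
    have hyx : y < x := lt_of_le_of_ne (not_lt.mp hnlt) (Ne.symm hne)
    have hya : (x :: a').count y = 0 := by
      rw [List.count_eq_zero]
      intro hmem
      rcases List.mem_cons.mp hmem with h | h
      · exact absurd h (ne_of_lt hyx)
      · exact absurd ((List.pairwise_cons.mp ha).1 y h) (not_le.mpr hyx)
    have hkey : pvSurplus (x :: a') (y :: b') = pvSurplus (x :: a') b' + 1 := by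
      unfold pvSurplus
      have hterm : ∀ c, c ≠ y →
          max (((y :: b').count c : Int) - ((x :: a').count c : Int)) 0
            = max ((b'.count c : Int) - ((x :: a').count c : Int)) 0 := by
        intro c hc; simp [List.count_cons, Ne.symm hc]
      have hy : max (((y :: b').count y : Int) - ((x :: a').count y : Int)) 0
          = max ((b'.count y : Int) - ((x :: a').count y : Int)) 0 + 1 := by
        simp only [List.count_cons_self, hya]
        push_cast; omega
      rw [List.toFinset_cons]
      by_cases hyb : y ∈ b'.toFinset
      · rw [Finset.insert_eq_self.mpr hyb]
        rw [← Finset.sum_erase_add _ _ hyb, ← Finset.sum_erase_add _ _ hyb, hy]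
        rw [Finset.sum_congr rfl (fun c hcm => hterm c (Finset.mem_erase.mp hcm).1)]
        ring
      · rw [Finset.sum_insert hyb, hy]
        have hyb' : y ∉ b' := by simpa using hyb
        rw [Finset.sum_congr rfl (fun c hcm => hterm c (fun h => hyb (h ▸ hcm)))]
        have : max ((b'.count y : Int) - ((x :: a').count y : Int)) 0 = 0 := by
          rw [List.count_eq_zero.mpr hyb', hya]; simp
        rw [this]; ring
    rw [hkey]; ring

-- sorting changes neither counts nor the set of characters
lemma pvSurplus_sorted (a b : List Char) :
    pvSurplus (PySem.List.sorted a (fun x => x) false) (PySem.List.sorted b (fun x => x) false)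
      = pvSurplus a b := by
  have hpa := PySem.List.sorted_perm a (fun x => x) false
  have hpb := PySem.List.sorted_perm b (fun x => x) false
  unfold pvSurplus
  have hfin : (PySem.List.sorted b (fun x => x) false).toFinset = b.toFinset := by
    ext c; simp [List.mem_toFinset, hpb.mem_iff]
  rw [hfin]
  exact Finset.sum_congr rfl (fun c _ => by rw [hpa.count_eq, hpb.count_eq])

-- ===== VERDICT (by name: the statement is the Claim_ definition above) =====
theorem anagram_difference_spec : Claim_equal_anagram_difference := by
  intro s _
  unfold Spec_anagram_difference anagram_difference anagram_difference_alt
  split_ifs with hodd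
  · rfl
  · rw [loopA_eq, zero_add,
        pvMergeLoop_eq_sum _ _ _ (PySem.List.sorted_pairwise _ _) (PySem.List.sorted_pairwise _ _),
        zero_add, pvSurplus_sorted]
    have hcnt : (fun c => (PySem.Dict.counter
        (PySem.List.slice s.toList none (some (PySem.Int.floordiv (PySem.Str.len s) 2)))).getD c 0)
        = fun c => ((PySem.List.slice s.toList none (some (PySem.Int.floordiv (PySem.Str.len s) 2))).count c : Int) := by
      funext c; exact PySem.Dict.getD_counter _ c
    rw [hcnt, pvExcess_eq_sum _ _ (fun c => by positivity)]
    rfl
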